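-- pv_equiv track=rewrite | github.com/pypi-data/pypi-mirror-365 | packages/antgent/antgent-0.3.0.tar.gz/antgent-0.3.0/antgent/utils/csv.py | _get_nesting_cols_by_name
-- ===== SOURCE A (Python) =====
-- def _get_nesting_cols_by_name(nesting_keys: list[str], fieldnames: list[str]) -> list[str]:
--     """Get nesting columns by name."""
--     actual_nesting_cols = []
--     fieldnames_lower = {f.lower(): f for f in fieldnames}
--     for key in nesting_keys:
--         actual_col = fieldnames_lower.get(str(key).lower())
--         if not actual_col:
--             raise ValueError(f"CSV must contain column '{key}'.")
--         actual_nesting_cols.append(actual_col)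
--     return actual_nesting_cols
-- ===== SOURCE B (Python) =====
-- def _get_nesting_cols_by_name(nesting_keys: list[str], fieldnames: list[str]) -> list[str]:
--     """Get nesting columns by name."""
--     lowered = [str(k).lower() for k in nesting_keys]
--     found = [None] * len(nesting_keys)
--     for f in fieldnames:
--         fl = f.lower()
--         for i, lk in enumerate(lowered):
--             if fl == lk:
--                 found[i] = f
--     actual_nesting_cols = []
--     for key, col in zip(nesting_keys, found):
--         if not col:
--             raise ValueError(f"CSV must contain column '{key}'.")
--         actual_nesting_cols.append(col)
--     return actual_nesting_cols
-- ===== Notes on version B (the rewrite author's own statement) =====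
-- stated objective: alternative
-- what changed: Inverts the loop nesting: instead of building a lowercase->name dict and looking keys up, B makes one pass over fieldnames filling a per-key slot array (later matches overwrite earlier ones), then a final validation/collection pass over the slots.
import Mathlib
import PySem

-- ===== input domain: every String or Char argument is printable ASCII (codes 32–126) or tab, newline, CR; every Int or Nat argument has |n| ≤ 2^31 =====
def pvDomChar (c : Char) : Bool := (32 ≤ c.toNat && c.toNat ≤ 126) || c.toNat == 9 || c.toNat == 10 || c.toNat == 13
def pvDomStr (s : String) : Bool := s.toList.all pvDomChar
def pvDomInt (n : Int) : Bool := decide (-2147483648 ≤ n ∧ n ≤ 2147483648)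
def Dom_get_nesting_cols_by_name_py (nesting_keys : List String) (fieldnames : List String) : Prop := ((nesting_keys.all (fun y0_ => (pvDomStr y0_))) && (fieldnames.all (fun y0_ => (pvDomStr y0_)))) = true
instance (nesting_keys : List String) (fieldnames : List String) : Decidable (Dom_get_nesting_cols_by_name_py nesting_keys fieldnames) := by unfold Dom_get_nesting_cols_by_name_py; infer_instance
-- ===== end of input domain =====

-- B inverts the loop nesting: one pass over fieldnames fills a per-key slot array (later matches
-- overwrite), then a validation/collection pass (objective: alternative); return values agree
-- wherever A returns.

-- ===== PORT A =====
-- loop 'for key in nesting_keys'; none = the ValueError raise ('if not actual_col')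
def pvGoA (d : PySem.Dict String String) : List String → Option (List String)
  | [] => some []
  | k :: ks =>
    match PySem.Dict.get? d (PySem.Str.lower k) with
    | none => none
    | some c => if c = "" then none else (pvGoA d ks).map (fun r => c :: r)

def get_nesting_cols_by_name_py (nesting_keys : List String) (fieldnames : List String) : List String :=
  (pvGoA (fieldnames.foldl (fun d f => d.insert (PySem.Str.lower f) f) PySem.Dict.empty)
    nesting_keys).getD []

-- ===== PORT B =====
-- state = lowered keys zipped with their 'found' slots (enumerate + indexed assignment);
-- outer loop 'for f in fieldnames', inner loop 'for i, lk in enumerate(lowered)'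
def pvFill (fieldnames : List String) (st : List (String × Option String)) :
    List (String × Option String) :=
  fieldnames.foldl
    (fun st f => st.map (fun p => if PySem.Str.lower f = p.1 then (p.1, some f) else p)) st

-- final loop 'for key, col in zip(...)'; none = the ValueError raise ('if not col')
def pvCollectB : List (String × Option String) → Option (List String)
  | [] => some []
  | p :: rest =>
    match p.2 with
    | none => none
    | some c => if c = "" then none else (pvCollectB rest).map (fun r => c :: r)

def get_nesting_cols_by_name_py_alt (nesting_keys : List String) (fieldnames : List String) : List String :=
  (pvCollectB (pvFill fieldnames (nesting_keys.map (fun k => (PySem.Str.lower k, none))))).getD []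

-- ===== PRECONDITION & SPEC =====
-- Pre_ excludes exactly the inputs where A raises ValueError: some key has no fieldname with the
-- same lowercasing, or the last such fieldname is the empty string (falsy); B raises there too.
def Pre_get_nesting_cols_by_name_py (nesting_keys : List String) (fieldnames : List String) : Prop :=
  ∀ k ∈ nesting_keys,
    ((fieldnames.filter (fun f => PySem.Str.lower f = PySem.Str.lower k)).getLast?.getD "") ≠ ""

instance (nesting_keys : List String) (fieldnames : List String) : Decidable (Pre_get_nesting_cols_by_name_py nesting_keys fieldnames) := by unfold Pre_get_nesting_cols_by_name_py; infer_instance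

def pvWitness_get_nesting_cols_by_name_py : List String × List String := (["Name", "AGE"], ["name", "Age", "city"])

def Spec_get_nesting_cols_by_name_py (nesting_keys : List String) (fieldnames : List String) (out : List String) : Prop := out = get_nesting_cols_by_name_py_alt nesting_keys fieldnames
instance (nesting_keys : List String) (fieldnames : List String) (out : List String) : Decidable (Spec_get_nesting_cols_by_name_py nesting_keys fieldnames out) := by unfold Spec_get_nesting_cols_by_name_py; infer_instance

-- ===== CLAIM (what is proved, stated in full; the proofs are below) =====
def Claim_equal_get_nesting_cols_by_name_py : Prop := ∀ (nesting_keys : List String) (fieldnames : List String), Dom_get_nesting_cols_by_name_py nesting_keys fieldnames → Pre_get_nesting_cols_by_name_py nesting_keys fieldnames → Spec_get_nesting_cols_by_name_py nesting_keys fieldnames (get_nesting_cols_by_name_py nesting_keys fieldnames)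

-- ===== LEMMAS AND PROOFS =====

-- looking up in the dict A builds = folding the last-match update over fieldnames
lemma dict_foldl_get? (fs : List String) (d : PySem.Dict String String) (t : String) :
    (fs.foldl (fun d f => d.insert (PySem.Str.lower f) f) d).get? t =
      fs.foldl (fun acc f => if PySem.Str.lower f = t then some f else acc) (d.get? t) := by
  induction fs generalizing d with
  | nil => rfl
  | cons f rest ih =>
    simp only [List.foldl_cons]
    rw [ih, PySem.Dict.get?_insert]
    by_cases h : PySem.Str.lower f = t
    · simp [h]
    · rw [if_neg (fun e => h e.symm), if_neg h]

-- B's fill pass, slot by slot: each slot ends up holding its own last-match fold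
lemma fill_spec (fs : List String) (st : List (String × Option String)) :
    pvFill fs st = st.map (fun p =>
      (p.1, fs.foldl (fun acc f => if PySem.Str.lower f = p.1 then some f else acc) p.2)) := by
  induction fs generalizing st with
  | nil => simp [pvFill]
  | cons f rest ih =>
    simp only [pvFill, List.foldl_cons] at *
    rw [ih, List.map_map]
    apply List.map_congr_left
    intro p _
    by_cases h : PySem.Str.lower f = p.1 <;> simp [h]

lemma collect_eq_goA (fs ks : List String) :
    pvCollectB (pvFill fs (ks.map (fun k => (PySem.Str.lower k, none)))) =
      pvGoA (fs.foldl (fun d f => d.insert (PySem.Str.lower f) f) PySem.Dict.empty) ks := by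
  rw [fill_spec, List.map_map]
  induction ks with
  | nil => rfl
  | cons k rest ih =>
    simp only [List.map_cons, Function.comp, pvCollectB, pvGoA, ih]
    rw [dict_foldl_get?]
    simp [PySem.Dict.get?_empty]

-- ===== VERDICT (by name: the statement is the Claim_ definition above) =====
theorem get_nesting_cols_by_name_py_spec : Claim_equal_get_nesting_cols_by_name_py := by
  intro ks fs _ _
  unfold Spec_get_nesting_cols_by_name_py get_nesting_cols_by_name_py get_nesting_cols_by_name_py_alt
  rw [collect_eq_goA]
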